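-- pv_equiv track=rewrite | github.com/hudsonshank/AOAI-RAG | src/utils/enhanced_excel_processor.py | _find_table_end_row
-- ===== SOURCE A (Python) =====
-- from typing import Dict, Any, List, Optional, Tuple
--
-- def _find_table_end_row(cell_grid: List[List[str]], start_row: int) -> int:
--     """Find where the table ends vertically"""
--     current_row = start_row
--     consecutive_empty = 0
--
--     while current_row + 1 < len(cell_grid):
--         next_row = cell_grid[current_row + 1]
--         non_empty_count = sum(1 for cell in next_row if cell.strip())
--
--         if non_empty_count == 0:
--             consecutive_empty += 1
--             if consecutive_empty >= 2:  # Two empty rows = end of table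
--                 break
--         else:
--             consecutive_empty = 0
--
--         current_row += 1
--
--     return current_row
-- ===== SOURCE B (Python) =====
-- def _find_table_end_row(cell_grid, start_row):
--     """Find where the table ends vertically."""
--     if not cell_grid:
--         return start_row
--     empties = [all(not cell.strip() for cell in row) for row in cell_grid]
--     n = len(cell_grid)
--     for i in range(start_row + 1, n - 1):
--         if empties[i] and empties[i + 1]:
--             return i
--     return max(start_row, n - 1)
-- ===== Notes on version B (the rewrite author's own statement) =====
-- stated objective: alternative
-- what changed: Replaces A's stateful while-loop with a consecutive-empty counter by a precomputed per-row emptiness table followed by a scan for the first adjacent pair of empty rows, with a closed-form max(start_row, n-1) fallback.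
import Mathlib
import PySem

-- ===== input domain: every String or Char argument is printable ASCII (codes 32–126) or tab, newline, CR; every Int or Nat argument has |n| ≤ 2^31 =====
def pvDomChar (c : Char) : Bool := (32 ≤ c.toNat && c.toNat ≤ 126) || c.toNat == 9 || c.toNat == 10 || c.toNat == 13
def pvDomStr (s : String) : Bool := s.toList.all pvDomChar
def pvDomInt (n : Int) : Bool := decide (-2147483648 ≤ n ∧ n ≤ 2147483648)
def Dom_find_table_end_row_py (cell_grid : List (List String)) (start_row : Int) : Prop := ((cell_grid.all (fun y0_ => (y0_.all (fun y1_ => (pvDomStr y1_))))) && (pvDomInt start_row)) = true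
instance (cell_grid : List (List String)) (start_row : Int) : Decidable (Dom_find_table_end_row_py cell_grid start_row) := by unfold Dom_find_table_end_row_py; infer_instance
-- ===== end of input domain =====

-- B replaces A's stateful consecutive-empty counter with a precomputed per-row emptiness
-- table followed by a scan for an adjacent empty pair (objective: alternative decomposition).

-- ===== PORT A =====
-- non_empty_count = sum(1 for cell in next_row if cell.strip())
def pvRowNonEmptyCount (row : List String) : Int :=
  row.foldl (fun acc cell => if PySem.Str.strip cell ≠ "" then acc + 1 else acc) 0

-- the while loop of A, state = (current_row, consecutive_empty);
-- a `none` from pyGet? is Python's IndexError (excluded by Pre_), the returned value there is arbitrary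
def pvLoopA (grid : List (List String)) (c : Int) (consec : Int) : Int :=
  if _h : c + 1 < (grid.length : Int) then
    match PySem.List.pyGet? grid (c + 1) with
    | none => c
    | some row =>
      if pvRowNonEmptyCount row = 0 then
        if consec + 1 ≥ 2 then c
        else pvLoopA grid (c + 1) (consec + 1)
      else pvLoopA grid (c + 1) 0
  else c
termination_by ((grid.length : Int) - (c + 1)).toNat
decreasing_by all_goals omega

def find_table_end_row_py (cell_grid : List (List String)) (start_row : Int) : Int :=
  pvLoopA cell_grid start_row 0

-- ===== PORT B =====
-- all(not cell.strip() for cell in row)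
def pvRowEmpty (row : List String) : Bool :=
  row.all (fun cell => PySem.Str.strip cell == "")

-- the for-loop with early return: first i in the range with empties[i] and empties[i+1]
def pvScanB (empties : List Bool) : List Int → Option Int
  | [] => none
  | i :: rest =>
    if PySem.List.pyGetD empties i false && PySem.List.pyGetD empties (i + 1) false then some i
    else pvScanB empties rest

def find_table_end_row_py_alt (cell_grid : List (List String)) (start_row : Int) : Int :=
  if cell_grid = [] then start_row
  else
    let empties := cell_grid.map pvRowEmpty
    let n : Int := cell_grid.length
    match pvScanB empties (PySem.List.pyRange (start_row + 1) (n - 1) 1) with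
    | some i => i
    | none => max start_row (n - 1)

-- ===== PRECONDITION & SPEC =====
-- Pre_ excludes exactly the inputs where A raises IndexError: start_row + 1 below -len(cell_grid)
-- (the loop then reads cell_grid[start_row+1] out of range, including on the empty grid).
def Pre_find_table_end_row_py (cell_grid : List (List String)) (start_row : Int) : Prop :=
  -(cell_grid.length : Int) ≤ start_row + 1

instance (cell_grid : List (List String)) (start_row : Int) : Decidable (Pre_find_table_end_row_py cell_grid start_row) := by
  unfold Pre_find_table_end_row_py; infer_instance

def pvWitness_find_table_end_row_py : List (List String) × Int := ([["a"], [""], [""], ["b"]], 0)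

def Spec_find_table_end_row_py (cell_grid : List (List String)) (start_row : Int) (out : Int) : Prop := out = find_table_end_row_py_alt cell_grid start_row
instance (cell_grid : List (List String)) (start_row : Int) (out : Int) : Decidable (Spec_find_table_end_row_py cell_grid start_row out) := by unfold Spec_find_table_end_row_py; infer_instance

-- ===== CLAIM (what is proved, stated in full; the proofs are below) =====
def Claim_equal_find_table_end_row_py : Prop := ∀ (cell_grid : List (List String)) (start_row : Int), Dom_find_table_end_row_py cell_grid start_row → Pre_find_table_end_row_py cell_grid start_row → Spec_find_table_end_row_py cell_grid start_row (find_table_end_row_py cell_grid start_row)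

-- ===== LEMMAS AND PROOFS =====

-- A's emptiness test (count = 0) coincides with B's (all cells strip to "")
lemma rowCount_aux (row : List String) (acc : Int) :
    row.foldl (fun acc cell => if PySem.Str.strip cell ≠ "" then acc + 1 else acc) acc
      = acc + (row.countP (fun cell => PySem.Str.strip cell ≠ "") : Int) := by
  induction row generalizing acc with
  | nil => simp
  | cons x xs ih =>
    simp only [List.foldl_cons, List.countP_cons, ih]
    by_cases h : PySem.Str.strip x ≠ ""
    · simp [h]; ring
    · simp [h]

lemma rowEmpty_iff (row : List String) :
    pvRowNonEmptyCount row = 0 ↔ pvRowEmpty row = true := by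
  unfold pvRowNonEmptyCount pvRowEmpty
  rw [rowCount_aux]
  simp [List.countP_eq_zero, List.all_eq_true]

lemma pyGet?_map {α β : Type} (f : α → β) (xs : List α) (i : Int) :
    PySem.List.pyGet? (xs.map f) i = (PySem.List.pyGet? xs i).map f := by
  simp only [PySem.List.pyGet?, List.length_map]
  cases PySem.List.pyIdx? xs.length i <;> simp

lemma pyGetD_map_of_get {α β : Type} (f : α → β) (xs : List α) (i : Int) (d : β) (x : α)
    (h : PySem.List.pyGet? xs i = some x) :
    PySem.List.pyGetD (xs.map f) i d = f x := by
  simp [PySem.List.pyGetD, pyGet?_map, h]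

-- main loop invariant: A's while loop equals B's adjacent-pair scan over the remaining range
lemma loop_eq (grid : List (List String)) :
    ∀ (k : Nat) (c consec : Int),
      ((grid.length : Int) - 1 - c).toNat ≤ k →
      -(grid.length : Int) ≤ c + 1 →
      (consec = 0 ∨ (consec = 1 ∧ -(grid.length : Int) ≤ c ∧
        PySem.List.pyGetD (grid.map pvRowEmpty) c false = true)) →
      pvLoopA grid c consec =
        (match pvScanB (grid.map pvRowEmpty)
            (PySem.List.pyRange (if consec = 1 then c else c + 1) ((grid.length : Int) - 1) 1) with
         | some i => i
         | none => if c + 1 < (grid.length : Int) then (grid.length : Int) - 1 else c) := by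
  intro k
  induction k with
  | zero =>
    intro c consec hk hlo hcons
    have hge : (grid.length : Int) ≤ c + 1 := by omega
    have hnil : PySem.List.pyRange (if consec = 1 then c else c + 1) ((grid.length : Int) - 1) 1 = [] := by
      apply PySem.List.pyRange_one_eq_nil
      rcases hcons with rfl | ⟨rfl, -, -⟩
      · rw [if_neg (by omega : ¬ ((0 : Int) = 1))]; omega
      · rw [if_pos rfl]; omega
    have hcond : ¬ (c + 1 < (grid.length : Int)) := by omega
    rw [pvLoopA, dif_neg hcond, hnil]
    simp [pvScanB, hcond]
  | succ k ih =>
    intro c consec hk hlo hcons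
    by_cases hlt : c + 1 < (grid.length : Int)
    · -- loop body runs; the index is in range
      obtain ⟨row, hrow⟩ : ∃ row, PySem.List.pyGet? grid (c + 1) = some row := by
        rcases h : PySem.List.pyGet? grid (c + 1) with _ | row
        · rw [PySem.List.pyGet?_eq_none_iff] at h
          exact absurd (by constructor <;> omega : PySem.Raise.InRange grid.length (c + 1)) h
        · exact ⟨row, rfl⟩
      have hE1 : PySem.List.pyGetD (grid.map pvRowEmpty) (c + 1) false = pvRowEmpty row :=
        pyGetD_map_of_get _ _ _ _ _ hrow
      rw [pvLoopA, dif_pos hlt]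
      simp only [hrow]
      by_cases hempty : pvRowNonEmptyCount row = 0
      · have hEt : pvRowEmpty row = true := (rowEmpty_iff row).mp hempty
        rcases hcons with rfl | ⟨rfl, hc0, hEc⟩
        · -- consec 0 → 1, advance
          rw [if_pos hempty, if_neg (by omega : ¬ ((0 : Int) + 1 ≥ 2)),
              show (0 : Int) + 1 = 1 by norm_num,
              ih (c + 1) 1 (by omega) (by omega) (Or.inr ⟨rfl, by omega, by rw [hE1, hEt]⟩),
              if_pos rfl, if_neg (by omega : ¬ ((0 : Int) = 1))]
          rcases hscan : pvScanB (grid.map pvRowEmpty)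
              (PySem.List.pyRange (c + 1) ((grid.length : Int) - 1) 1) with _ | i
          · simp only []
            by_cases hc2 : c + 1 + 1 < (grid.length : Int)
            · rw [if_pos hc2, if_pos hlt]
            · rw [if_neg hc2, if_pos hlt]; omega
          · simp
        · -- consec 1 and rows c, c+1 both empty: break returning c
          rw [if_pos hempty, if_pos (by omega : (1 : Int) + 1 ≥ 2), if_pos rfl,
              PySem.List.pyRange_one_cons (by omega : c < (grid.length : Int) - 1)]
          simp [pvScanB, hEc, hE1, hEt]
      · -- next row non-empty: reset counter, advance
        have hEf : pvRowEmpty row = false := by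
          rcases h : pvRowEmpty row with _ | _
          · rfl
          · exact absurd ((rowEmpty_iff row).mpr h) hempty
        rw [if_neg hempty, ih (c + 1) 0 (by omega) (by omega) (Or.inl rfl),
            if_neg (by omega : ¬ ((0 : Int) = 1))]
        have htail : pvScanB (grid.map pvRowEmpty)
            (PySem.List.pyRange (if consec = 1 then c else c + 1) ((grid.length : Int) - 1) 1)
            = pvScanB (grid.map pvRowEmpty)
                (PySem.List.pyRange (c + 1) ((grid.length : Int) - 1) 1) := by
          rcases hcons with rfl | ⟨rfl, hc0, hEc⟩
          · rw [if_neg (by omega : ¬ ((0 : Int) = 1))]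
          · rw [if_pos rfl, PySem.List.pyRange_one_cons (by omega : c < (grid.length : Int) - 1)]
            simp [pvScanB, hE1, hEf]
        rw [htail]
        rcases hscan2 : pvScanB (grid.map pvRowEmpty)
            (PySem.List.pyRange (c + 1 + 1) ((grid.length : Int) - 1) 1) with _ | i
        · by_cases hc2 : c + 1 < (grid.length : Int) - 1
          · rw [PySem.List.pyRange_one_cons hc2]
            simp only [pvScanB, hE1, hEf, Bool.false_and, if_neg (Bool.false_ne_true), hscan2]
            by_cases hc3 : c + 1 + 1 < (grid.length : Int)
            · rw [if_pos hc3, if_pos hlt]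
            · rw [if_neg hc3, if_pos hlt]; omega
          · rw [PySem.List.pyRange_one_eq_nil (by omega : (grid.length : Int) - 1 ≤ c + 1)]
            simp only [pvScanB]
            rw [if_neg (by omega : ¬ (c + 1 + 1 < (grid.length : Int))), if_pos hlt]
            omega
        · by_cases hc2 : c + 1 < (grid.length : Int) - 1
          · rw [PySem.List.pyRange_one_cons hc2]
            simp [pvScanB, hE1, hEf, hscan2]
          · rw [PySem.List.pyRange_one_eq_nil (by omega : (grid.length : Int) - 1 ≤ c + 1 + 1)] at hscan2
            simp [pvScanB] at hscan2
    · -- loop never runs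
      have hnil : PySem.List.pyRange (if consec = 1 then c else c + 1) ((grid.length : Int) - 1) 1 = [] := by
        apply PySem.List.pyRange_one_eq_nil
        rcases hcons with rfl | ⟨rfl, -, -⟩
        · rw [if_neg (by omega : ¬ ((0 : Int) = 1))]; omega
        · rw [if_pos rfl]; omega
      rw [pvLoopA, dif_neg hlt, hnil]
      simp [pvScanB, hlt]

-- ===== VERDICT (by name: the statement is the Claim_ definition above) =====
theorem find_table_end_row_py_spec : Claim_equal_find_table_end_row_py := by
  intro grid s _hdom hpre
  unfold Spec_find_table_end_row_py find_table_end_row_py find_table_end_row_py_alt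
  unfold Pre_find_table_end_row_py at hpre
  by_cases hnil : grid = []
  · subst hnil
    rw [pvLoopA, if_pos rfl, dif_neg (by simp at hpre ⊢; omega)]
  · simp only [if_neg hnil]
    have hlen : 1 ≤ (grid.length : Int) := by
      have := List.length_pos_iff.mpr hnil
      omega
    rw [loop_eq grid ((grid.length : Int) - 1 - s).toNat s 0 (le_refl _) hpre (Or.inl rfl),
        if_neg (by omega : ¬ ((0 : Int) = 1))]
    rcases hscan : pvScanB (grid.map pvRowEmpty)
        (PySem.List.pyRange (s + 1) ((grid.length : Int) - 1) 1) with _ | i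
    · by_cases hle : s + 1 < (grid.length : Int)
      · rw [if_pos hle, max_eq_right (by omega : s ≤ (grid.length : Int) - 1)]
      · rw [if_neg hle, max_eq_left (by omega : (grid.length : Int) - 1 ≤ s)]
    · simp
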